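-- pv_equiv track=rewrite | github.com/Feng-Yin/adventofcode2024 | Day14/solution.py | is_a_tree_v2
-- ===== SOURCE A (Python) =====
-- def is_a_tree_v2(final_robots, width, height):
--     for j in range(height):
--         row = []
--         for i in range(width):
--             if (i, j) in final_robots:
--                 row.append('*')
--             else:
--                 row.append('.')
--         rs = ''.join(row)
--         if "*********" in rs:
--             return True
--     return False
-- ===== SOURCE B (Python) =====
-- def is_a_tree_v2(final_robots, width, height):
--     # Scan the robots, not the grid: a run of 9 '*' must start at a robot cell.
--     pts = set(final_robots)
--     for (x, y) in final_robots:
--         if 0 <= y < height and 0 <= x and x + 8 < width and all((x + k, y) in pts for k in range(1, 9)):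
--             return True
--     return False
-- ===== Notes on version B (the rewrite author's own statement) =====
-- stated objective: faster
-- what changed: Instead of rendering every grid row as a string and substring-searching it, B iterates over the robot list and checks with a hash set whether the 8 cells to the right of each in-bounds robot are also robots.
import Mathlib
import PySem

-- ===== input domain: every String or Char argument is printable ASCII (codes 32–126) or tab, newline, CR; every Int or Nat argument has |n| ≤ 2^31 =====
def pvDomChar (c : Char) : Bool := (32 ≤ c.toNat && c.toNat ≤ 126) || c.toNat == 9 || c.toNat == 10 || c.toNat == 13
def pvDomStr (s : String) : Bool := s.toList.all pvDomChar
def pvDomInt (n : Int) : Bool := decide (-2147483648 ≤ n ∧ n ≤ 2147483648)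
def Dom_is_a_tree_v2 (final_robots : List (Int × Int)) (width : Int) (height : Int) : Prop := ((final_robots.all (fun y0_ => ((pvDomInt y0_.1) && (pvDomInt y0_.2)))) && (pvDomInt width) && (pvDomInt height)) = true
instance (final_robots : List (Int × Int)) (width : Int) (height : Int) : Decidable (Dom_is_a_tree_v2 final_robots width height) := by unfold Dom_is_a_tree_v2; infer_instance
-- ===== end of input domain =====

-- B scans the robot list with a hash set of robot cells instead of rendering every grid row
-- as a string and substring-searching it (objective: faster).

-- ===== PORT A =====
def is_a_tree_v2 (final_robots : List (Int × Int)) (width : Int) (height : Int) : Bool :=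
  (PySem.List.pyRange 0 height 1).any fun j =>
    let row : List String :=
      (PySem.List.pyRange 0 width 1).foldl
        (fun row i => row ++ [if final_robots.contains (i, j) then "*" else "."]) []
    let rs : String := PySem.Str.join "" row
    PySem.Str.isIn "*********" rs

-- ===== PORT B =====
def is_a_tree_v2_alt (final_robots : List (Int × Int)) (width : Int) (height : Int) : Bool :=
  let pts : PySem.Set (Int × Int) := PySem.Set.ofList final_robots
  final_robots.any fun p =>
    decide (0 ≤ p.2) && decide (p.2 < height) && decide (0 ≤ p.1) && decide (p.1 + 8 < width) &&
    (PySem.List.pyRange 1 9 1).all fun k => pts.contains (p.1 + k, p.2)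

-- ===== PRECONDITION & SPEC =====
def Spec_is_a_tree_v2 (final_robots : List (Int × Int)) (width : Int) (height : Int) (out : Bool) : Prop := out = is_a_tree_v2_alt final_robots width height
instance (final_robots : List (Int × Int)) (width : Int) (height : Int) (out : Bool) : Decidable (Spec_is_a_tree_v2 final_robots width height out) := by unfold Spec_is_a_tree_v2; infer_instance

-- ===== CLAIM (what is proved, stated in full; the proofs are below) =====
def Claim_equal_is_a_tree_v2 : Prop := ∀ (final_robots : List (Int × Int)) (width : Int) (height : Int), Dom_is_a_tree_v2 final_robots width height → Spec_is_a_tree_v2 final_robots width height (is_a_tree_v2 final_robots width height)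

-- ===== LEMMAS AND PROOFS =====

-- replicate n c is a prefix of l iff the first n slots of l all hold c
theorem replicate_prefix_iff (n : ℕ) (c : Char) (l : List Char) :
    List.replicate n c <+: l ↔ n ≤ l.length ∧ ∀ k < n, l[k]? = some c := by
  rw [List.prefix_iff_eq_take]
  constructor
  · intro h
    have hlen : n ≤ l.length := by
      have := congrArg List.length h
      simp [List.length_take] at this
      omega
    refine ⟨hlen, fun k hk => ?_⟩
    have := congrArg (fun t => t[k]?) h.symm
    simpa [List.getElem?_take, hk] using this
  · rintro ⟨hlen, hall⟩
    apply List.ext_getElem?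
    intro k
    by_cases hk : k < n
    · simp [hk, hall k hk]
    · simp [hk]

-- a run of 9 '*' inside the rendered row ↔ an Int start position with 9 hits
theorem run_iff (g : Int → Char) (w : Int) :
    PySem.Chars.isIn (List.replicate 9 '*') ((PySem.List.pyRange 0 w 1).map g) = true ↔
    ∃ x : Int, 0 ≤ x ∧ x + 9 ≤ w ∧ ∀ k : Int, 0 ≤ k → k < 9 → g (x + k) = '*' := by
  have hlen : ((PySem.List.pyRange 0 w 1).map g).length = w.toNat := by
    simp [PySem.List.length_pyRange_one]
  have hget : ∀ m : ℕ, m < w.toNat → ((PySem.List.pyRange 0 w 1).map g)[m]? = some (g m) := by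
    intro m hm
    have hm' : m < ((PySem.List.pyRange 0 w 1).map g).length := by omega
    rw [List.getElem?_eq_getElem hm']
    simp [PySem.List.getElem_pyRange_one]
  rw [← PySem.Chars.exists_prefix_drop_iff_isIn]
  constructor
  · rintro ⟨j, hpre⟩
    rw [replicate_prefix_iff] at hpre
    obtain ⟨hlen9, hall⟩ := hpre
    have hjl : j + 9 ≤ w.toNat := by
      simp [List.length_drop, hlen] at hlen9; omega
    refine ⟨(j : Int), by positivity, by omega, fun k hk0 hk9 => ?_⟩
    have hk := hall k.toNat (by omega)
    rw [List.getElem?_drop, hget (j + k.toNat) (by omega)] at hk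
    have : ((j + k.toNat : ℕ) : Int) = (j : Int) + k := by omega
    rw [this] at hk
    exact Option.some.injEq _ _ ▸ (by simpa using hk)
  · rintro ⟨x, hx0, hxw, hrun⟩
    refine ⟨x.toNat, ?_⟩
    rw [replicate_prefix_iff]
    constructor
    · simp [List.length_drop, hlen]; omega
    · intro k hk
      rw [List.getElem?_drop, hget (x.toNat + k) (by omega)]
      have : ((x.toNat + k : ℕ) : Int) = x + (k : Int) := by omega
      rw [this, hrun k (by omega) (by omega)]

-- the characters of A's rendered row j
theorem rowChars (robots : List (Int × Int)) (w j : Int) :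
    (PySem.Str.join ""
      ((PySem.List.pyRange 0 w 1).foldl
        (fun row i => row ++ [if robots.contains (i, j) then "*" else "."]) [])).toList
    = (PySem.List.pyRange 0 w 1).map (fun i => if robots.contains (i, j) then '*' else '.') := by
  rw [PySem.List.foldl_append_singleton_eq_map, List.nil_append, PySem.Str.toList_join]
  have : (List.map String.toList
      ((PySem.List.pyRange 0 w 1).map (fun i => if robots.contains (i, j) then "*" else ".")))
      = List.map (fun c => [c])
        ((PySem.List.pyRange 0 w 1).map (fun i => if robots.contains (i, j) then '*' else '.')) := by
    simp only [List.map_map]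
    apply List.map_congr_left
    intro i _
    simp only [Function.comp]
    by_cases h : (i, j) ∈ robots <;> simp [h]
  rw [this]
  exact PySem.Chars.join_nil_singletons _

-- A returns true iff some row 0 ≤ j < height contains a 9-run of robots
theorem A_iff (robots : List (Int × Int)) (w h : Int) :
    is_a_tree_v2 robots w h = true ↔
    ∃ j : Int, (0 ≤ j ∧ j < h) ∧ ∃ x : Int, 0 ≤ x ∧ x + 9 ≤ w ∧
      ∀ k : Int, 0 ≤ k → k < 9 → (x + k, j) ∈ robots := by
  unfold is_a_tree_v2
  rw [List.any_eq_true]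
  constructor
  · rintro ⟨j, hj, hb⟩
    rw [PySem.List.mem_pyRange_one] at hj
    simp only [PySem.Str.isIn_eq] at hb
    rw [rowChars robots w j] at hb
    have hpat : "*********".toList = List.replicate 9 '*' := by decide
    rw [hpat, run_iff] at hb
    obtain ⟨x, hx0, hxw, hrun⟩ := hb
    refine ⟨j, hj, x, hx0, hxw, fun k hk0 hk9 => ?_⟩
    have := hrun k hk0 hk9
    simpa using this
  · rintro ⟨j, hj, x, hx0, hxw, hrun⟩
    refine ⟨j, PySem.List.mem_pyRange_one.mpr hj, ?_⟩
    simp only [PySem.Str.isIn_eq]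
    rw [rowChars robots w j]
    have hpat : "*********".toList = List.replicate 9 '*' := by decide
    rw [hpat, run_iff]
    refine ⟨x, hx0, hxw, fun k hk0 hk9 => ?_⟩
    simp [hrun k hk0 hk9]

-- B returns true iff some robot starts such a run
theorem B_iff (robots : List (Int × Int)) (w h : Int) :
    is_a_tree_v2_alt robots w h = true ↔
    ∃ p ∈ robots, (0 ≤ p.2 ∧ p.2 < h ∧ 0 ≤ p.1 ∧ p.1 + 8 < w) ∧
      ∀ k : Int, 1 ≤ k → k < 9 → (p.1 + k, p.2) ∈ robots := by
  unfold is_a_tree_v2_alt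
  simp only [List.any_eq_true, Bool.and_eq_true, List.all_eq_true, decide_eq_true_eq,
    PySem.Set.contains_iff, PySem.Set.mem_ofList, PySem.List.mem_pyRange_one]
  constructor
  · rintro ⟨p, hp, ⟨⟨⟨h1, h2⟩, h3⟩, h4⟩, hall⟩
    exact ⟨p, hp, ⟨h1, h2, h3, h4⟩, fun k hk1 hk9 => hall k ⟨hk1, hk9⟩⟩
  · rintro ⟨p, hp, ⟨h1, h2, h3, h4⟩, hall⟩
    exact ⟨p, hp, ⟨⟨⟨h1, h2⟩, h3⟩, h4⟩, fun k hk => hall k hk.1 hk.2⟩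

-- ===== VERDICT (by name: the statement is the Claim_ definition above) =====
theorem is_a_tree_v2_spec : Claim_equal_is_a_tree_v2 := by
  intro robots w h _
  unfold Spec_is_a_tree_v2
  rw [Bool.eq_iff_iff, A_iff, B_iff]
  constructor
  · rintro ⟨j, ⟨hj0, hjh⟩, x, hx0, hxw, hrun⟩
    refine ⟨(x, j), ?_, ⟨hj0, hjh, hx0, by omega⟩, fun k hk1 hk9 => hrun k (by omega) hk9⟩
    have := hrun 0 le_rfl (by omega)
    simpa using this
  · rintro ⟨⟨x, j⟩, hp, ⟨hj0, hjh, hx0, hxw⟩, hall⟩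
    refine ⟨j, ⟨hj0, hjh⟩, x, hx0, by omega, fun k hk0 hk9 => ?_⟩
    rcases eq_or_lt_of_le hk0 with hk | hk
    · simpa [← hk] using hp
    · exact hall k (by omega) hk9
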